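-- pv_equiv track=rewrite | github.com/JpCurada/g6-mp2-desalgo | src/optimization/optimized_knapsack_problem.py | knapsack_optimize
-- ===== SOURCE A (Python) =====
-- def knapsack_optimize(items, capacity):
--     """
--     Solves the 0/1 Knapsack problem using dynamic programming without
--     using built-in functions like len, append, or any imports.
--     Parameters:
--         items (list of dict): Each dictionary contains two keys:
--             - "weight" (int): The weight of the item.
--             - "value" (int): The value of the item.
--         capacity (int): The maximum weight the knapsack can carry.
--     Returns:
--         tuple:
--             best_subset (list of int): List of indices (0-based) of the selected items.
--             best_value (int): The maximum total value that can be carried in the knapsack.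
--             all_valid_subsets (list): All optimal subsets found (for reference).
--     """
--
--     # count number_of_items without len()
--     number_of_items = 0
--     while True:
--         try:
--             _ = items[number_of_items]
--             number_of_items += 1
--         except IndexError:
--             break
--
--     # Create DP table or 2d Array
--     knapsack_table = []
--     item_index = 0
--     while item_index <= number_of_items:
--         row_for_current_item = []
--         current_capacity = 0
--         while current_capacity <= capacity:
--             row_for_current_item += [0]
--             current_capacity += 1
--         knapsack_table += [row_for_current_item]
--         item_index += 1
--
--     # Fill the table
--     current_item = 1
--     while current_item <= number_of_items:
--         current_capacity = 0
--         while current_capacity <= capacity: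
--             item_weight = items[current_item - 1]["weight"]
--             item_value = items[current_item - 1]["value"]
--
--             if item_weight <= current_capacity:
--                 value_with_item = knapsack_table[current_item - 1][current_capacity - item_weight] + item_value
--                 value_without_item = knapsack_table[current_item - 1][current_capacity]
--                 if value_with_item > value_without_item:
--                     knapsack_table[current_item][current_capacity] = value_with_item
--                 else:
--                     knapsack_table[current_item][current_capacity] = value_without_item
--             else:
--                 knapsack_table[current_item][current_capacity] = knapsack_table[current_item - 1][current_capacity]
--
--             current_capacity += 1
--         current_item += 1
--
--     # Backtracking: generate all optimal subsets recursively
--     all_valid_subsets = []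
--
--     def generate_subsets(current_item, current_capacity, current_subset, total_weight, total_value):
--         if current_item == 0:
--             # copy current_subset
--             collected_subset = []
--             index = 0
--             while index < len(current_subset):
--                 collected_subset.append(current_subset[index])
--                 index += 1
--             all_valid_subsets.append((collected_subset, total_weight, total_value))
--             return
--
--         item_weight = items[current_item - 1]["weight"]
--         item_value = items[current_item - 1]["value"]
--
--         # Check if the item was included in the optimal solution
--         if item_weight <= current_capacity:
--             if knapsack_table[current_item][current_capacity] == knapsack_table[current_item - 1][current_capacity - item_weight] + item_value:
--                 # Create a new subset list with the current item included
--                 new_subset = []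
--                 index = 0
--                 while index < len(current_subset):
--                     new_subset.append(current_subset[index])
--                     index += 1
--                 new_subset.append(current_item - 1)
--                 generate_subsets(current_item - 1, current_capacity - item_weight, new_subset, total_weight + item_weight, total_value + item_value)
--
--         # Check if the item was excluded in the optimal solution
--         if knapsack_table[current_item][current_capacity] == knapsack_table[current_item - 1][current_capacity]:
--             generate_subsets(current_item - 1, current_capacity, current_subset, total_weight, total_value)
--
--     generate_subsets(number_of_items, capacity, [], 0, 0)
--
--     best_value = knapsack_table[number_of_items][capacity]
--
--     best_subset = []
--     if len(all_valid_subsets) > 0: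
--         best_subset = all_valid_subsets[0][0]  # pick first optimal subset
--
--     return best_subset, best_value, all_valid_subsets
-- ===== SOURCE B (Python) =====
-- def knapsack_optimize(items, capacity):
--     """0/1 knapsack: same DP table built row-functionally, and the recursive
--     backtracking replaced by an explicit stack-based DFS (same output order)."""
--     n = len(items)
--     # DP rows: rows[i][c] = best value using first i items with capacity c
--     rows = [[0] * (capacity + 1)]
--     for item in items:
--         w = item["weight"]
--         v = item["value"]
--         prev = rows[-1]
--         rows.append([max(prev[c - w] + v, prev[c]) if w <= c else prev[c]
--                      for c in range(capacity + 1)])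
--
--     all_valid_subsets = []
--     stack = [(n, capacity, [], 0, 0)]
--     while stack:
--         i, c, subset, tw, tv = stack.pop()
--         if i == 0:
--             all_valid_subsets.append((subset, tw, tv))
--             continue
--         w = items[i - 1]["weight"]
--         v = items[i - 1]["value"]
--         # push exclude first so the include branch is expanded first (DFS preorder)
--         if rows[i][c] == rows[i - 1][c]:
--             stack.append((i - 1, c, subset, tw, tv))
--         if w <= c and rows[i][c] == rows[i - 1][c - w] + v:
--             stack.append((i - 1, c - w, subset + [i - 1], tw + w, tv + v))
--
--     best_value = rows[n][capacity]
--     best_subset = all_valid_subsets[0][0] if all_valid_subsets else []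
--     return best_subset, best_value, all_valid_subsets
-- ===== Notes on version B (the rewrite author's own statement) =====
-- stated objective: alternative
-- what changed: B builds the DP table row-by-row with list comprehensions (instead of mutating a preallocated 2D array cell-by-cell in nested while loops) and replaces the recursive subset backtracking with an explicit stack-based DFS, pushing the exclude branch before the include branch to keep the original emission order.
import Mathlib
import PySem

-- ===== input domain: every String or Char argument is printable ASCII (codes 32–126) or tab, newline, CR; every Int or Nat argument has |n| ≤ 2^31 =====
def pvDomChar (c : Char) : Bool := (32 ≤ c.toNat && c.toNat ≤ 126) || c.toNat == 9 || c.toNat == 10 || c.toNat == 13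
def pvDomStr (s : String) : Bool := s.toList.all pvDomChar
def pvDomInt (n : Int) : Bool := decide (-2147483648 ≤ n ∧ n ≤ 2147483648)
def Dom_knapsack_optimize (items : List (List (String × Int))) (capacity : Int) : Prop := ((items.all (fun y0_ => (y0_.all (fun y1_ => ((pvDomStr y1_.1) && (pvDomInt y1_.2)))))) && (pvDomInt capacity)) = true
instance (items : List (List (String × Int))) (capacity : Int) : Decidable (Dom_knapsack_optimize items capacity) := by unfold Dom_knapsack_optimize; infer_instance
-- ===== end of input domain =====

-- B builds the same DP table row-functionally and replaces the recursive backtracking by an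
-- explicit stack DFS; equivalence of the RETURN values is proved on Pre_ (where the Python returns).

-- shared tiny accessors (exact on Pre_: indices in range, keys present there; defaults never reached)
def pvIdx (xs : List Int) (i : Int) : Int := PySem.List.pyGetD xs i 0
def pvIdx2 (t : List (List Int)) (i : Nat) (c : Int) : Int := pvIdx (t.getD i []) c
def pvGetKeyD (d : List (String × Int)) (k : String) : Int := PySem.Dict.getD (PySem.Dict.mk d) k 0
def pvItem (items : List (List (String × Int))) (j : Nat) : List (String × Int) := items.getD j []

-- ===== PORT A =====
-- inner 'row_for_current_item += [0]' loop
def kpA_zeroRow (capacity : Int) (cc : Int) (row : List Int) : List Int :=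
  if cc ≤ capacity then kpA_zeroRow capacity (cc + 1) (row ++ [0]) else row
  termination_by (capacity + 1 - cc).toNat
  decreasing_by omega

-- outer 'knapsack_table += [row]' loop (item_index counts 0..number_of_items)
def kpA_buildTable (capacity : Int) (n : Nat) (i : Nat) (table : List (List Int)) : List (List Int) :=
  if i ≤ n then kpA_buildTable capacity n (i + 1) (table ++ [kpA_zeroRow capacity 0 []]) else table
  termination_by n + 1 - i

-- 'knapsack_table[i][cc] = v' (row i exists and cc in range on Pre_)
def kpA_set2 (t : List (List Int)) (i : Nat) (c : Int) (v : Int) : List (List Int) :=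
  t.set i (PySem.List.pySetD (t.getD i []) c v)

-- inner capacity loop of the fill phase (current_item = i, 1 ≤ i)
def kpA_fillCap (items : List (List (String × Int))) (capacity : Int) (i : Nat) (cc : Int)
    (table : List (List Int)) : List (List Int) :=
  if cc ≤ capacity then
    let w := pvGetKeyD (pvItem items (i - 1)) "weight"
    let v := pvGetKeyD (pvItem items (i - 1)) "value"
    let table' :=
      if w ≤ cc then
        let vw := pvIdx2 table (i - 1) (cc - w) + v
        let vo := pvIdx2 table (i - 1) cc
        if vw > vo then kpA_set2 table i cc vw else kpA_set2 table i cc vo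
      else kpA_set2 table i cc (pvIdx2 table (i - 1) cc)
    kpA_fillCap items capacity i (cc + 1) table'
  else table
  termination_by (capacity + 1 - cc).toNat
  decreasing_by omega

-- outer item loop of the fill phase (current_item from 1 to n)
def kpA_fillItems (items : List (List (String × Int))) (capacity : Int) (n : Nat) (i : Nat)
    (table : List (List Int)) : List (List Int) :=
  if i ≤ n then kpA_fillItems items capacity n (i + 1) (kpA_fillCap items capacity i 0 table) else table
  termination_by n + 1 - i

-- generate_subsets: recursion on current_item; include branch explored before exclude branch,
-- appends to all_valid_subsets in that order (list copies are identity on immutable lists)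
def kpA_gen (items : List (List (String × Int))) (table : List (List Int)) :
    Nat → Int → List Int → Int → Int → List (List Int × Int × Int)
  | 0, _c, subset, tw, tv => [(subset, tw, tv)]
  | i + 1, c, subset, tw, tv =>
      let w := pvGetKeyD (pvItem items i) "weight"
      let v := pvGetKeyD (pvItem items i) "value"
      let inc :=
        if w ≤ c ∧ pvIdx2 table (i + 1) c = pvIdx2 table i (c - w) + v then
          kpA_gen items table i (c - w) (subset ++ [(i : Int)]) (tw + w) (tv + v)
        else []
      let exc :=
        if pvIdx2 table (i + 1) c = pvIdx2 table i c then kpA_gen items table i c subset tw tv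
        else []
      inc ++ exc

def knapsack_optimize (items : List (List (String × Int))) (capacity : Int) :
    List Int × Int × (List (List Int × Int × Int)) :=
  let number_of_items := items.length          -- the try/except counting loop computes len(items)
  let table0 := kpA_buildTable capacity number_of_items 0 []
  let table := kpA_fillItems items capacity number_of_items 1 table0
  let all_valid_subsets := kpA_gen items table number_of_items capacity [] 0 0
  let best_value := pvIdx2 table number_of_items capacity
  let best_subset :=
    if all_valid_subsets.length > 0 then (PySem.List.pyGetD all_valid_subsets 0 ([], 0, 0)).1 else []
  (best_subset, best_value, all_valid_subsets)

-- ===== PORT B =====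
-- one DP row by comprehension over range(capacity+1)
def kpB_row (prev : List Int) (w v : Int) (capacity : Int) : List Int :=
  (PySem.List.pyRange 0 (capacity + 1) 1).map (fun c =>
    if w ≤ c then max (pvIdx prev (c - w) + v) (pvIdx prev c) else pvIdx prev c)

-- rows built by a fold over the items, each new row from rows[-1]
def kpB_rows (items : List (List (String × Int))) (capacity : Int) : List (List Int) :=
  items.foldl
    (fun rows item =>
      let w := pvGetKeyD item "weight"
      let v := pvGetKeyD item "value"
      let prev := PySem.List.pyGetD rows (-1) []
      rows ++ [kpB_row prev w v capacity])
    [List.replicate (capacity + 1).toNat 0]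

-- explicit stack DFS; head of the list is the top of the stack (stack.pop());
-- exclude pushed first, include second, so include is expanded first
def kpB_loop (items : List (List (String × Int))) (rows : List (List Int)) :
    List (Nat × Int × List Int × Int × Int) → List (List Int × Int × Int) → List (List Int × Int × Int)
  | [], acc => acc
  | (0, _c, subset, tw, tv) :: rest, acc => kpB_loop items rows rest (acc ++ [(subset, tw, tv)])
  | (i + 1, c, subset, tw, tv) :: rest, acc =>
      let w := pvGetKeyD (pvItem items i) "weight"
      let v := pvGetKeyD (pvItem items i) "value"
      let st1 := if pvIdx2 rows (i + 1) c = pvIdx2 rows i c then (i, c, subset, tw, tv) :: rest else rest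
      let st2 :=
        if w ≤ c ∧ pvIdx2 rows (i + 1) c = pvIdx2 rows i (c - w) + v then
          (i, c - w, subset ++ [(i : Int)], tw + w, tv + v) :: st1
        else st1
      kpB_loop items rows st2 acc
  termination_by st _ => (st.map (fun s => 3 ^ s.1)).sum
  decreasing_by
  · simp only [List.map_cons, List.sum_cons, pow_zero]; omega
  · split_ifs <;> simp only [List.map_cons, List.sum_cons, pow_succ] <;>
      (have h1 : 1 ≤ 3 ^ i := Nat.one_le_pow _ _ (by omega); omega)

def knapsack_optimize_alt (items : List (List (String × Int))) (capacity : Int) :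
    List Int × Int × (List (List Int × Int × Int)) :=
  let n := items.length
  let rows := kpB_rows items capacity
  let all_valid_subsets := kpB_loop items rows [(n, capacity, [], 0, 0)] []
  let best_value := pvIdx2 rows n capacity
  let best_subset :=
    if all_valid_subsets = [] then [] else (PySem.List.pyGetD all_valid_subsets 0 ([], 0, 0)).1
  (best_subset, best_value, all_valid_subsets)

-- ===== PRECONDITION & SPEC =====
-- Pre_ excludes exactly the inputs where the Python A raises: negative capacity (IndexError on an
-- empty table row), an item without a "weight"/"value" key (KeyError), and a negative weight
-- (IndexError: knapsack_table[i-1][c-w] with c-w > capacity is reached at c = capacity).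
def Pre_knapsack_optimize (items : List (List (String × Int))) (capacity : Int) : Prop :=
  0 ≤ capacity ∧ ∀ it ∈ items,
    (PySem.Dict.get? (PySem.Dict.mk it) "weight").isSome = true ∧
    (PySem.Dict.get? (PySem.Dict.mk it) "value").isSome = true ∧
    0 ≤ PySem.Dict.getD (PySem.Dict.mk it) "weight" 0
instance (items : List (List (String × Int))) (capacity : Int) :
    Decidable (Pre_knapsack_optimize items capacity) := by unfold Pre_knapsack_optimize; infer_instance

def pvWitness_knapsack_optimize : (List (List (String × Int))) × Int :=
  ([[("weight", 2), ("value", 3)], [("weight", 1), ("value", 3)]], 2)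

def Spec_knapsack_optimize (items : List (List (String × Int))) (capacity : Int) (out : List Int × Int × (List (List Int × Int × Int))) : Prop := out = knapsack_optimize_alt items capacity
instance (items : List (List (String × Int))) (capacity : Int) (out : List Int × Int × (List (List Int × Int × Int))) : Decidable (Spec_knapsack_optimize items capacity out) := by unfold Spec_knapsack_optimize; infer_instance

-- ===== CLAIM (what is proved, stated in full; the proofs are below) =====
def Claim_equal_knapsack_optimize : Prop := ∀ (items : List (List (String × Int))) (capacity : Int), Dom_knapsack_optimize items capacity → Pre_knapsack_optimize items capacity → Spec_knapsack_optimize items capacity (knapsack_optimize items capacity)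

-- ===== LEMMAS AND PROOFS =====

theorem kpA_zeroRow_eq (capacity cc : Int) (row : List Int) :
    kpA_zeroRow capacity cc row = row ++ List.replicate (capacity + 1 - cc).toNat 0 := by
  fun_induction kpA_zeroRow capacity cc row with
  | case1 cc row h ih =>
      rw [ih]
      have h1 : (capacity + 1 - cc).toNat = (capacity - cc).toNat + 1 := by omega
      simp [h1, List.replicate_succ]
  | case2 cc row h =>
      have h1 : (capacity + 1 - cc).toNat = 0 := by omega
      simp [h1]

theorem kpA_buildTable_eq (capacity : Int) (n i : Nat) (table : List (List Int)) :
    kpA_buildTable capacity n i table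
      = table ++ List.replicate (n + 1 - i) (List.replicate (capacity + 1).toNat 0) := by
  fun_induction kpA_buildTable capacity n i table with
  | case1 i table h ih =>
      rw [ih, kpA_zeroRow_eq]
      have h1 : n + 1 - i = (n - i) + 1 := by omega
      have h2 : n + 1 - (i + 1) = n - i := by omega
      simp [h1, h2, List.replicate_succ]
  | case2 i table h =>
      have h1 : n + 1 - i = 0 := by omega
      simp [h1]

-- the cell value the fill loop writes at capacity c, reading the previous row
def kpRowVal (prev : List Int) (w v c : Int) : Int :=
  if w ≤ c then
    (if pvIdx prev (c - w) + v > pvIdx prev c then pvIdx prev (c - w) + v else pvIdx prev c)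
  else pvIdx prev c

theorem kpRowVal_eq_max (prev : List Int) (w v c : Int) :
    kpRowVal prev w v c
      = if w ≤ c then max (pvIdx prev (c - w) + v) (pvIdx prev c) else pvIdx prev c := by
  unfold kpRowVal; split_ifs <;> omega

theorem kpA_fillCap_step (items : List (List (String × Int))) (capacity : Int) (i : Nat)
    (cc : Int) (t : List (List Int)) (h : cc ≤ capacity) :
    kpA_fillCap items capacity i cc t
      = kpA_fillCap items capacity i (cc + 1)
          (kpA_set2 t i cc
            (kpRowVal (t.getD (i - 1) []) (pvGetKeyD (pvItem items (i - 1)) "weight")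
              (pvGetKeyD (pvItem items (i - 1)) "value") cc)) := by
  conv_lhs => rw [kpA_fillCap]
  simp only [if_pos h, kpRowVal, pvIdx2]
  split_ifs <;> rfl

theorem kpA_fillCap_stop (items : List (List (String × Int))) (capacity : Int) (i : Nat)
    (cc : Int) (t : List (List Int)) (h : ¬ cc ≤ capacity) :
    kpA_fillCap items capacity i cc t = t := by
  rw [kpA_fillCap]; simp [h]

theorem kpA_fillCap_eq (items : List (List (String × Int))) (capacity : Int) (i : Nat)
    (hi : 1 ≤ i) :
    ∀ (cc : Int) (t : List (List Int)), 0 ≤ cc → i < t.length →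
      (t.getD i []).length = (capacity + 1).toNat →
      kpA_fillCap items capacity i cc t
        = t.set i ((t.getD i []).take cc.toNat
            ++ (PySem.List.pyRange cc (capacity + 1) 1).map
                (kpRowVal (t.getD (i - 1) []) (pvGetKeyD (pvItem items (i - 1)) "weight")
                  (pvGetKeyD (pvItem items (i - 1)) "value"))) := by
  intro cc t
  induction hfuel : (capacity + 1 - cc).toNat generalizing cc t with
  | zero =>
      intro h0 hlt hrow
      rw [kpA_fillCap_stop items capacity i cc t (by omega)]
      rw [PySem.List.pyRange_one_eq_nil (by omega)]
      rw [List.take_of_length_le (by omega)]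
      simp only [List.map_nil, List.append_nil]
      rw [List.getD_eq_getElem?_getD, List.getElem?_eq_getElem hlt]
      simp
  | succ m ih =>
      intro h0 hlt hrow
      have hcc : cc ≤ capacity := by omega
      set w := pvGetKeyD (pvItem items (i - 1)) "weight" with hw
      set v := pvGetKeyD (pvItem items (i - 1)) "value" with hv
      set row := t.getD i [] with hrowdef
      set val := kpRowVal (t.getD (i - 1) []) w v cc with hval
      rw [kpA_fillCap_step items capacity i cc t hcc]
      have hccn : cc.toNat < row.length := by omega
      have hset_get : (kpA_set2 t i cc val).getD i [] = row.set cc.toNat val := by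
        unfold kpA_set2
        rw [PySem.List.pySetD_of_nonneg _ _ h0]
        rw [List.getD_eq_getElem?_getD, List.getElem?_set_self hlt]
        simp [List.getElem?_eq_getElem hlt]
        rw [hrowdef]
        simp [List.getD_eq_getElem?_getD, List.getElem?_eq_getElem hlt]
      have hset_prev : (kpA_set2 t i cc val).getD (i - 1) [] = t.getD (i - 1) [] := by
        unfold kpA_set2
        rw [List.getD_eq_getElem?_getD, List.getElem?_set_ne (by omega), ← List.getD_eq_getElem?_getD]
      rw [ih (cc + 1) (kpA_set2 t i cc val) (by omega) (by omega)
            (by simpa [kpA_set2] using hlt) (by rw [hset_get]; simpa using hrow)]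
      rw [hset_get, hset_prev]
      have htake : (row.set cc.toNat val).take (cc + 1).toNat = row.take cc.toNat ++ [val] := by
        have h1 : (cc + 1).toNat = cc.toNat + 1 := by omega
        rw [h1, List.take_add_one, List.take_set, List.getElem?_set_self hccn,
            List.set_eq_of_length_le (by simp)]
        simp
      rw [htake]
      rw [PySem.List.pyRange_one_cons (by omega : cc < capacity + 1), List.map_cons]
      have : kpRowVal (t.getD (i - 1) []) w v cc = val := rfl
      rw [this]
      unfold kpA_set2
      rw [PySem.List.pySetD_of_nonneg _ _ h0, List.set_set]
      simp

theorem kpB_rows_snoc_gen (capacity : Int) (xs : List (List (String × Int)))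
    (x : List (String × Int)) (init : List (List Int)) :
    (xs ++ [x]).foldl
      (fun rows item =>
        rows ++ [kpB_row (PySem.List.pyGetD rows (-1) []) (pvGetKeyD item "weight")
            (pvGetKeyD item "value") capacity]) init
    = (xs.foldl (fun rows item =>
        rows ++ [kpB_row (PySem.List.pyGetD rows (-1) []) (pvGetKeyD item "weight")
            (pvGetKeyD item "value") capacity]) init)
      ++ [kpB_row (PySem.List.pyGetD (xs.foldl (fun rows item =>
            rows ++ [kpB_row (PySem.List.pyGetD rows (-1) []) (pvGetKeyD item "weight")
                (pvGetKeyD item "value") capacity]) init) (-1) [])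
          (pvGetKeyD x "weight") (pvGetKeyD x "value") capacity] := by
  rw [List.foldl_append]
  simp [List.foldl]

theorem kpB_rows_snoc (capacity : Int) (xs : List (List (String × Int))) (x : List (String × Int)) :
    kpB_rows (xs ++ [x]) capacity
      = kpB_rows xs capacity
        ++ [kpB_row (PySem.List.pyGetD (kpB_rows xs capacity) (-1) [])
            (pvGetKeyD x "weight") (pvGetKeyD x "value") capacity] := by
  unfold kpB_rows
  exact kpB_rows_snoc_gen capacity xs x _

theorem kpB_rows_length (capacity : Int) (xs : List (List (String × Int))) :
    (kpB_rows xs capacity).length = xs.length + 1 := by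
  induction xs using List.reverseRecOn with
  | nil => simp [kpB_rows]
  | append_singleton ys y ih => rw [kpB_rows_snoc]; simp [ih]

theorem kpB_row_eq_map (prev : List Int) (w v capacity : Int) :
    kpB_row prev w v capacity
      = (PySem.List.pyRange 0 (capacity + 1) 1).map (kpRowVal prev w v) := by
  unfold kpB_row
  apply List.map_congr_left
  intro c _
  rw [kpRowVal_eq_max]

theorem kpA_fill_loop (items : List (List (String × Int))) (capacity : Int) (_h0 : 0 ≤ capacity) :
    ∀ (j : Nat), j ≤ items.length →
      kpA_fillItems items capacity items.length (j + 1)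
          (kpB_rows (items.take j) capacity
            ++ List.replicate (items.length - j) (List.replicate (capacity + 1).toNat 0))
        = kpB_rows items capacity := by
  intro j
  induction hfuel : items.length - j generalizing j with
  | zero =>
      intro hj
      have hje : j = items.length := by omega
      subst hje
      rw [kpA_fillItems, if_neg (by omega)]
      simp [List.take_of_length_le (le_refl items.length)]
  | succ m ih =>
      intro hj
      have hjlt : j < items.length := by omega
      rw [kpA_fillItems, if_pos (by omega)]
      have hPlen : (kpB_rows (items.take j) capacity).length = j + 1 := by
        rw [kpB_rows_length]; simp; omega
      have hne : kpB_rows (items.take j) capacity ≠ [] := by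
        intro h; rw [h] at hPlen; simp at hPlen
      rw [List.replicate_succ]
      have hgetZ : ((kpB_rows (items.take j) capacity
            ++ List.replicate (capacity + 1).toNat 0
              :: List.replicate m (List.replicate (capacity + 1).toNat 0)).getD (j + 1) [])
          = List.replicate (capacity + 1).toNat 0 := by
        rw [List.getD_eq_getElem?_getD, List.getElem?_append_right (by omega), hPlen]
        simp
      rw [kpA_fillCap_eq items capacity (j + 1) (by omega) 0 _ (by omega)
            (by simp [hPlen]) (by rw [hgetZ]; simp)]
      rw [hgetZ]
      have hprev : ((kpB_rows (items.take j) capacity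
            ++ List.replicate (capacity + 1).toNat 0
              :: List.replicate m (List.replicate (capacity + 1).toNat 0)).getD (j + 1 - 1) [])
          = PySem.List.pyGetD (kpB_rows (items.take j) capacity) (-1) [] := by
        rw [PySem.List.pyGetD_neg_one _ _ hne]
        rw [List.getD_eq_getElem?_getD]
        rw [List.getElem?_append_left (by omega)]
        rw [List.getElem?_eq_getElem (by omega)]
        simp [List.getLast_eq_getElem, hPlen]
      rw [hprev]
      have hitem : pvItem items (j + 1 - 1) = items[j] := by
        simp [pvItem, List.getD_eq_getElem?_getD, List.getElem?_eq_getElem hjlt]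
      rw [hitem]
      rw [List.set_append, if_neg (by omega)]
      have hsub : j + 1 - (kpB_rows (items.take j) capacity).length = 0 := by omega
      rw [hsub]
      simp only [List.set_cons_zero]
      have hrows : kpB_rows (items.take (j + 1)) capacity
          = kpB_rows (items.take j) capacity
            ++ [kpB_row (PySem.List.pyGetD (kpB_rows (items.take j) capacity) (-1) [])
                (pvGetKeyD items[j] "weight") (pvGetKeyD items[j] "value") capacity] := by
        rw [List.take_succ_eq_append_getElem hjlt, kpB_rows_snoc]
      have hgoal := ih (j + 1) (by omega) (by omega)
      rw [hrows, kpB_row_eq_map] at hgoal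
      simpa using hgoal

theorem kpA_table_eq (items : List (List (String × Int))) (capacity : Int) (h0 : 0 ≤ capacity) :
    kpA_fillItems items capacity items.length 1 (kpA_buildTable capacity items.length 0 [])
      = kpB_rows items capacity := by
  rw [kpA_buildTable_eq]
  have h := kpA_fill_loop items capacity h0 0 (by omega)
  simpa [kpB_rows, List.replicate_succ] using h

theorem kpB_loop_eq (items : List (List (String × Int))) (rows : List (List Int)) :
    ∀ (i : Nat) (c : Int) (s : List Int) (tw tv : Int)
      (rest : List (Nat × Int × List Int × Int × Int)) (acc : List (List Int × Int × Int)),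
      kpB_loop items rows ((i, c, s, tw, tv) :: rest) acc
        = kpB_loop items rows rest (acc ++ kpA_gen items rows i c s tw tv) := by
  intro i
  induction i with
  | zero =>
      intro c s tw tv rest acc
      rw [kpB_loop]
      simp [kpA_gen]
  | succ i ih =>
      intro c s tw tv rest acc
      rw [kpB_loop]
      simp only [kpA_gen]
      split_ifs <;> simp [ih, List.append_assoc]

-- ===== VERDICT (by name: the statement is the Claim_ definition above) =====
theorem knapsack_optimize_spec : Claim_equal_knapsack_optimize := by
  intro items capacity hdom hpre
  obtain ⟨h0, -⟩ := hpre
  unfold Spec_knapsack_optimize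
  simp only [knapsack_optimize, knapsack_optimize_alt]
  rw [kpA_table_eq items capacity h0]
  rw [kpB_loop_eq]
  rw [kpB_loop]
  simp only [List.nil_append]
  cases h : kpA_gen items (kpB_rows items capacity) items.length capacity [] 0 0 with
  | nil => simp
  | cons a tl => simp [PySem.List.pyGetD_zero_cons]
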